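-- pv_equiv track=rewrite | github.com/Becelchak/VacantProject | main/static/main/py/createDataFromCSV.py | prepare_salary
-- ===== SOURCE A (Python) =====
-- def prepare_salary(string_salary):
--         list_numb = []
--         count = 0
--         for char in reversed(string_salary):
--             if count < 3:
--                 list_numb.append(char)
--                 count += 1
--             else:
--                 list_numb.append(" ")
--                 list_numb.append(char)
--                 count = 0
--         return "".join(list_numb.__reversed__())
-- ===== SOURCE B (Python) =====
-- def prepare_salary(string_salary):
--     r = string_salary[::-1]
--     chunks = [r[0:3]] + [r[i:i + 4] for i in range(3, len(r), 4)]
--     return " ".join(chunks)[::-1]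
-- ===== Notes on version B (the rewrite author's own statement) =====
-- stated objective: simpler
-- what changed: Replaces the per-character counter loop (append char, reset counter, re-reverse) by slicing: reverse once, take a 3-char head chunk and 4-char step slices, join with spaces and reverse back.
import Mathlib
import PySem

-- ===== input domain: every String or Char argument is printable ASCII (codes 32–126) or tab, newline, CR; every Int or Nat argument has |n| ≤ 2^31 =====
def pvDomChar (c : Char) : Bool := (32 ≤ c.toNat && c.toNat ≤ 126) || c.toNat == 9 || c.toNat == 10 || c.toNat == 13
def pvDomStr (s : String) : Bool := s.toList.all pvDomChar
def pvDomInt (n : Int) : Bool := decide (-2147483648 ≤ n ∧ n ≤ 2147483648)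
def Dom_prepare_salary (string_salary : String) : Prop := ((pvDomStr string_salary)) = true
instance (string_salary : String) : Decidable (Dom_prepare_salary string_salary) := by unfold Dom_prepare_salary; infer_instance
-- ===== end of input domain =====

-- B formats the salary by slicing the reversed string into a 3-char head chunk and 4-char step slices
-- joined with spaces, instead of A's per-character counter loop: simpler decomposition, same cost.


-- ===== PORT A =====
-- for char in reversed(string_salary): append to list_numb with the 3-then-4 counter; join the reversal
def prepare_salary (string_salary : String) : String :=
  let st := string_salary.toList.reverse.foldl
    (fun (st : List Char × Int) (c : Char) =>
      if st.2 < 3 then (st.1 ++ [c], st.2 + 1) else (st.1 ++ [' ', c], 0))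
    ([], 0)
  String.mk st.1.reverse

-- ===== PORT B =====
-- r = s[::-1]; chunks = [r[0:3]] + [r[i:i+4] for i in range(3, len(r), 4)]; " ".join(chunks)[::-1]
def prepare_salary_alt (string_salary : String) : String :=
  let r := string_salary.toList.reverse
  let chunks := PySem.List.slice r (some 0) (some 3) ::
    (PySem.List.pyRange 3 (r.length : Int) 4).map
      (fun i => PySem.List.slice r (some i) (some (i + 4)))
  String.mk ((PySem.Chars.join [' '] chunks).reverse)

-- ===== PRECONDITION & SPEC =====
def Spec_prepare_salary (string_salary : String) (out : String) : Prop := out = prepare_salary_alt string_salary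
instance (string_salary : String) (out : String) : Decidable (Spec_prepare_salary string_salary out) := by unfold Spec_prepare_salary; infer_instance

-- ===== CLAIM (what is proved, stated in full; the proofs are below) =====
def Claim_equal_prepare_salary : Prop := ∀ (string_salary : String), Dom_prepare_salary string_salary → Spec_prepare_salary string_salary (prepare_salary string_salary)

-- ===== LEMMAS AND PROOFS =====

-- A's loop, written as structural recursion on the remaining characters: the suffix it appends.
def loopA : List Char → Int → List Char
  | [], _ => []
  | c :: cs, k => if k < 3 then c :: loopA cs (k + 1) else ' ' :: c :: loopA cs 0

theorem foldlA_eq (l : List Char) : ∀ (acc : List Char) (k : Int),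
    (l.foldl (fun (st : List Char × Int) (c : Char) =>
      if st.2 < 3 then (st.1 ++ [c], st.2 + 1) else (st.1 ++ [' ', c], 0)) (acc, k)).1
    = acc ++ loopA l k := by
  induction l with
  | nil => intro acc k; simp [loopA]
  | cons c cs ih =>
    intro acc k
    by_cases h : k < 3 <;> simp [loopA, h, ih]

-- B's tail groups: a space, then the next (at most) 4 characters, repeatedly.
def spaceChunks : List Char → List Char
  | [] => []
  | [c] => [' ', c]
  | [c, a] => [' ', c, a]
  | [c, a, b] => [' ', c, a, b]
  | c :: a :: b :: d :: rest => ' ' :: c :: a :: b :: d :: spaceChunks rest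

theorem spaceChunks_cons (c : Char) (cs : List Char) :
    spaceChunks (c :: cs) = ' ' :: c :: (cs.take 3 ++ spaceChunks (cs.drop 3)) := by
  match cs with
  | [] => simp [spaceChunks]
  | [a] => simp [spaceChunks]
  | [a, b] => simp [spaceChunks]
  | a :: b :: d :: rest => simp [spaceChunks]

theorem loopA_three (l : List Char) : loopA l 3 = spaceChunks l := by
  induction l using spaceChunks.induct with
  | case1 => simp [loopA, spaceChunks]
  | case2 c => simp [loopA, spaceChunks]
  | case3 c a => simp [loopA, spaceChunks]
  | case4 c a b => simp [loopA, spaceChunks]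
  | case5 c a b d rest ih => simp [loopA, spaceChunks, ih]

theorem loopA_zero (l : List Char) : loopA l 0 = l.take 3 ++ spaceChunks (l.drop 3) := by
  match l with
  | [] => simp [loopA, spaceChunks]
  | [a] => simp [loopA, spaceChunks]
  | [a, b] => simp [loopA, spaceChunks]
  | a :: b :: c :: rest => simp [loopA, loopA_three]

-- step lemma for range(i, n, 4) (derived from the library's closed form pyRange_of_pos)
theorem pyRange_four_step (a b : Int) :
    PySem.List.pyRange a b 4 = if a < b then a :: PySem.List.pyRange (a + 4) b 4 else [] := by
  rw [PySem.List.pyRange_of_pos a b (by norm_num), PySem.List.pyRange_of_pos (a + 4) b (by norm_num)]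
  by_cases h : a < b
  · by_cases h4 : a + 4 < b
    · have hm : (if a < b then ((b - a + 4 - 1) / 4).toNat else 0)
          = (if a + 4 < b then ((b - (a + 4) + 4 - 1) / 4).toNat else 0) + 1 := by
        simp only [if_pos h, if_pos h4]; omega
      rw [hm, List.range_succ_eq_map]
      simp [if_pos h, Function.comp_def, mul_add]
      ring_nf
      simp
    · have hm : (if a < b then ((b - a + 4 - 1) / 4).toNat else 0) = 1 := by
        simp only [if_pos h]; omega
      rw [hm]
      simp [if_pos h, if_neg h4]
  · simp [if_neg h]

theorem chunks4 : ∀ (k : Nat) (r : List Char) (i : Nat), r.length - i ≤ k →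
    ((PySem.List.pyRange (i : Int) (r.length : Int) 4).map
      (fun j => PySem.List.slice r (some j) (some (j + 4)))).flatMap (fun c => ' ' :: c)
    = spaceChunks (r.drop i) := by
  intro k
  induction k with
  | zero =>
    intro r i h
    rw [pyRange_four_step, if_neg (by exact_mod_cast Nat.not_lt.mpr (by omega))]
    rw [List.drop_eq_nil_of_le (by omega)]
    simp [spaceChunks]
  | succ k ih =>
    intro r i h
    by_cases hi : i < r.length
    · rw [pyRange_four_step, if_pos (by exact_mod_cast hi)]
      have hsl : PySem.List.slice r (some (i : Int)) (some ((i : Int) + 4)) = (r.drop i).take 4 := by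
        have := PySem.List.slice_natCast_add r i 4
        simpa using this
      have hcast : (i : Int) + 4 = ((i + 4 : Nat) : Int) := by push_cast; ring
      rw [List.map_cons, List.flatMap_cons, hsl, hcast, ih r (i + 4) (by omega)]
      obtain ⟨c, cs, hcs⟩ : ∃ c cs, r.drop i = c :: cs := by
        cases hd : r.drop i with
        | nil => exact absurd (List.drop_eq_nil_iff.mp hd) (by omega)
        | cons c cs => exact ⟨c, cs, rfl⟩
      have hdrop : r.drop (i + 4) = cs.drop 3 := by
        have h4 : (r.drop i).drop 4 = r.drop (i + 4) := List.drop_drop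
        rw [← h4, hcs]; rfl
      rw [hcs, hdrop, spaceChunks_cons]
      simp
    · rw [pyRange_four_step, if_neg (by exact_mod_cast Nat.not_lt.mpr (by omega))]
      rw [List.drop_eq_nil_of_le (by omega)]
      simp [spaceChunks]

theorem intercalate_space (cs : List (List Char)) (c0 : List Char) :
    PySem.Chars.join [' '] (c0 :: cs) = c0 ++ cs.flatMap (fun c => ' ' :: c) := by
  induction cs generalizing c0 with
  | nil => simp [PySem.Chars.join, List.intercalate]
  | cons x xs ih =>
    simp [PySem.Chars.join, List.intercalate] at ih ⊢
    simp [ih x]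

-- ===== VERDICT (by name: the statement is the Claim_ definition above) =====
theorem prepare_salary_spec : Claim_equal_prepare_salary := by
  intro s _
  unfold Spec_prepare_salary prepare_salary prepare_salary_alt
  simp only []
  rw [foldlA_eq]
  congr 1
  have h := chunks4 s.toList.reverse.length s.toList.reverse 3 (by omega)
  simp only [Nat.cast_ofNat] at h
  rw [intercalate_space, h]
  rw [PySem.List.slice_zero_start, PySem.List.slice_to _ (show (0:Int) ≤ 3 by norm_num)]
  simp [loopA_zero]
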